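-- pv_equiv track=rewrite | github.com/MegaGiciorPortas/WDI-Zadania | 01-zmienne/1.34.py | czy_geometryczny
-- ===== SOURCE A (Python) =====
-- def czy_geometryczny(n):
--     if n < 100:
--         return True
--
--     a1 = n % 10
--     n //= 10
--     a2 = n % 10
--     n //= 10
--
--     while n > 0:
--         a3 = n % 10
--         n //= 10
--         if a1 * a3 != a2 * a2:
--             return False
--         a1 = a2
--         a2 = a3
--     return True
-- ===== SOURCE B (Python) =====
-- def czy_geometryczny(n):
--     if n < 100:
--         return True
--     digits = [ord(c) - 48 for c in str(n)]
--     return all(digits[i] * digits[i + 2] == digits[i + 1] ** 2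
--                for i in range(len(digits) - 2))
-- ===== Notes on version B (the rewrite author's own statement) =====
-- stated objective: simpler
-- what changed: A streams digits least-significant-first with three rolling registers and an early-return check fused into the extraction loop; B materialises the full digit list from str(n) and checks every consecutive triple with a single all(...) over index windows (the cross-product test is symmetric, so forward order matches A's reverse streaming).
import Mathlib
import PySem

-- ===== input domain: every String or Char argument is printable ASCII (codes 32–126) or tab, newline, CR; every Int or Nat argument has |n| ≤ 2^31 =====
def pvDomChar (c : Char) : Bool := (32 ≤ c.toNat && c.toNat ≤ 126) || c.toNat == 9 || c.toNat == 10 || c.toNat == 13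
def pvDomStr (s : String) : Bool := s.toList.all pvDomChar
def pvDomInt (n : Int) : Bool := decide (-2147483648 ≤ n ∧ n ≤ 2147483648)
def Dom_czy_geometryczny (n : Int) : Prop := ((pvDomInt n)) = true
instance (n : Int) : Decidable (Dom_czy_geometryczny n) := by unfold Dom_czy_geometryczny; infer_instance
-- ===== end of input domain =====

-- B replaces A's streaming three-register digit-extraction loop by materialising the digit
-- list of str(n) and checking every consecutive triple in one all(...) pass (objective: simpler).

-- ===== PORT A =====
-- A's while-loop: state (a1, a2, n); stops when n ≤ 0
def czyLoop (a1 a2 n : Int) : Bool :=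
  if h : 0 < n then
    let a3 := PySem.Int.mod n 10
    let n' := PySem.Int.floordiv n 10
    if a1 * a3 != a2 * a2 then false
    else czyLoop a2 a3 n'
  else true
termination_by n.toNat
decreasing_by
  have h1 : PySem.Int.floordiv n 10 = n / 10 := PySem.Int.floordiv_eq_ediv_of_pos (by omega)
  simp only [h1]; omega

def czy_geometryczny (n : Int) : Bool :=
  if n < 100 then true
  else
    let a1 := PySem.Int.mod n 10
    let n1 := PySem.Int.floordiv n 10
    let a2 := PySem.Int.mod n1 10
    let n2 := PySem.Int.floordiv n1 10
    czyLoop a1 a2 n2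

-- ===== PORT B =====
def czy_geometryczny_alt (n : Int) : Bool :=
  if n < 100 then true
  else
    let digits : List Int := (PySem.Int.toStr n).toList.map (fun c => (c.toNat : Int) - 48)
    (PySem.List.pyRange 0 ((digits.length : Int) - 2) 1).all (fun i =>
      PySem.List.pyGetD digits i 0 * PySem.List.pyGetD digits (i + 2) 0 ==
        PySem.List.pyGetD digits (i + 1) 0 ^ 2)

-- ===== PRECONDITION & SPEC =====
def Spec_czy_geometryczny (n : Int) (out : Bool) : Prop := out = czy_geometryczny_alt n
instance (n : Int) (out : Bool) : Decidable (Spec_czy_geometryczny n out) := by unfold Spec_czy_geometryczny; infer_instance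

-- ===== CLAIM (what is proved, stated in full; the proofs are below) =====
def Claim_equal_czy_geometryczny : Prop := ∀ (n : Int), Dom_czy_geometryczny n → Spec_czy_geometryczny n (czy_geometryczny n)

-- ===== LEMMAS AND PROOFS =====

-- the geometric-triples window condition both programs decide
def win (xs : List Int) : Prop :=
  ∀ i : Nat, i + 2 < xs.length →
    xs.getD i 0 * xs.getD (i + 2) 0 = xs.getD (i + 1) 0 * xs.getD (i + 1) 0

theorem win_cons (a b c : Int) (L : List Int) :
    win (a :: b :: c :: L) ↔ a * c = b * b ∧ win (b :: c :: L) := by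
  constructor
  · intro h
    refine ⟨by simpa using h 0 (by simp), ?_⟩
    intro i hi
    simpa using h (i + 1) (by simp at hi ⊢; omega)
  · rintro ⟨h1, h2⟩ i hi
    cases i with
    | zero => simpa using h1
    | succ j => simpa using h2 j (by simp at hi ⊢; omega)

theorem win_two (a b : Int) : win [a, b] := by
  intro i hi; simp at hi

theorem win_reverse_aux (xs : List Int) (h : win xs) : win xs.reverse := by
  intro i hi
  rw [List.length_reverse] at hi
  have e : ∀ k, k < xs.length → xs.reverse.getD k 0 = xs.getD (xs.length - 1 - k) 0 := by
    intro k hk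
    rw [List.getD_eq_getElem _ _ (by simpa using hk), List.getElem_reverse,
      List.getD_eq_getElem _ _ (by omega)]
  rw [e i (by omega), e (i + 2) (by omega), e (i + 1) (by omega)]
  have h3 := h (xs.length - 3 - i) (by omega)
  have e1 : xs.length - 1 - i = (xs.length - 3 - i) + 2 := by omega
  have e2 : xs.length - 1 - (i + 2) = xs.length - 3 - i := by omega
  have e3 : xs.length - 1 - (i + 1) = (xs.length - 3 - i) + 1 := by omega
  rw [e1, e2, e3, mul_comm]
  exact h3

theorem win_reverse (xs : List Int) : win xs.reverse ↔ win xs :=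
  ⟨fun h => by simpa using win_reverse_aux _ h, win_reverse_aux xs⟩

-- decimal digits of k, least significant first (proof-only model of A's extraction order)
def revDigits (k : Int) : List Int :=
  if h : 0 < k then PySem.Int.mod k 10 :: revDigits (PySem.Int.floordiv k 10)
  else []
termination_by k.toNat
decreasing_by
  have h1 : PySem.Int.floordiv k 10 = k / 10 := PySem.Int.floordiv_eq_ediv_of_pos (by omega)
  simp only [h1]; omega

theorem revDigits_pos (k : Int) (h : 0 < k) :
    revDigits k = PySem.Int.mod k 10 :: revDigits (PySem.Int.floordiv k 10) := by
  rw [revDigits, dif_pos h]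

-- A's check, abstracted over an explicit digit list
def chk (a1 a2 : Int) : List Int → Bool
  | [] => true
  | a3 :: rest => if a1 * a3 != a2 * a2 then false else chk a2 a3 rest

theorem floordiv_lt (k : Int) (h : 0 < k) : (PySem.Int.floordiv k 10).toNat < k.toNat := by
  have h1 : PySem.Int.floordiv k 10 = k / 10 := PySem.Int.floordiv_eq_ediv_of_pos (by omega)
  rw [h1]; omega

theorem czyLoop_eq_chk (t : Nat) : ∀ (k a1 a2 : Int), k.toNat ≤ t →
    czyLoop a1 a2 k = chk a1 a2 (revDigits k) := by
  induction t with
  | zero =>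
    intro k a1 a2 hk
    rw [czyLoop, revDigits]
    have : ¬ 0 < k := by omega
    simp [this, chk]
  | succ t ih =>
    intro k a1 a2 hk
    rw [czyLoop, revDigits]
    by_cases h : 0 < k
    · simp only [h, dif_pos, chk]
      split
      · rfl
      · exact ih _ _ _ (by have := floordiv_lt k h; omega)
    · simp [h, chk]

theorem chk_iff_win (L : List Int) : ∀ a1 a2 : Int, chk a1 a2 L = true ↔ win (a1 :: a2 :: L) := by
  induction L with
  | nil => intro a1 a2; simpa [chk] using win_two a1 a2
  | cons a3 rest ih =>
    intro a1 a2
    rw [win_cons]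
    by_cases hc : a1 * a3 = a2 * a2
    · simp [chk, hc, ih]
    · simp [chk, hc]

theorem digitVal (d : Nat) (hd : d < 10) : ((Nat.digitChar d).toNat : Int) - 48 = (d : Int) := by
  interval_cases d <;> decide

theorem mod_cast10 (m : Nat) : PySem.Int.mod (m : Int) 10 = ((m % 10 : Nat) : Int) := by
  exact_mod_cast PySem.Int.mod_natCast m 10

theorem floordiv_cast10 (m : Nat) : PySem.Int.floordiv (m : Int) 10 = ((m / 10 : Nat) : Int) := by
  exact_mod_cast PySem.Int.floordiv_natCast m 10

theorem toDigits_map (m : Nat) (hm : 0 < m) :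
    (Nat.toDigits 10 m).map (fun c => ((c.toNat : Int) - 48)) = (revDigits (m : Int)).reverse := by
  induction m using Nat.strong_induction_on with
  | _ m ih =>
  rw [revDigits]
  have hpos : 0 < (m : Int) := by exact_mod_cast hm
  rw [dif_pos hpos, mod_cast10, floordiv_cast10]
  by_cases h10 : m < 10
  · have hd0 : m / 10 = 0 := by omega
    have hm10 : m % 10 = m := by omega
    rw [Nat.toDigits_of_lt_base h10, hd0, hm10]
    rw [show ((0 : Nat) : Int) = 0 from rfl, revDigits]
    simp [digitVal m h10]
  · rw [Nat.toDigits_of_base_le (by omega) (by omega), List.map_append,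
      ih (m / 10) (by omega) (by omega)]
    simp [digitVal (m % 10) (by omega)]

theorem a_iff (n : Int) (h : ¬ n < 100) :
    czy_geometryczny n = true ↔ win (revDigits n) := by
  unfold czy_geometryczny
  rw [if_neg h]
  have h1 : 10 ≤ PySem.Int.floordiv n 10 := by
    rw [PySem.Int.le_floordiv_iff_mul_le (by omega)]; omega
  rw [czyLoop_eq_chk (PySem.Int.floordiv (PySem.Int.floordiv n 10) 10).toNat _ _ _ le_rfl,
    chk_iff_win, revDigits_pos n (by omega), revDigits_pos (PySem.Int.floordiv n 10) (by omega)]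

theorem alt_iff (n : Int) (h : ¬ n < 100) :
    czy_geometryczny_alt n = true ↔ win ((revDigits n).reverse) := by
  have hn : ¬ n < 0 := by omega
  have hcast : ((n.toNat : Nat) : Int) = n := by omega
  unfold czy_geometryczny_alt
  rw [if_neg h]
  have hd : (PySem.Int.toStr n).toList.map (fun c => (c.toNat : Int) - 48)
      = (revDigits n).reverse := by
    rw [PySem.Int.toList_toStr]
    show (PySem.Int.toChars n).map _ = _
    rw [PySem.Int.toChars, if_neg hn, toDigits_map n.toNat (by omega), hcast]
  simp only [hd]
  set D := (revDigits n).reverse with hD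
  rw [List.all_eq_true]
  constructor
  · intro hall i hi
    have hm : (i : Int) ∈ PySem.List.pyRange 0 ((D.length : Int) - 2) 1 := by
      rw [PySem.List.mem_pyRange_one]; omega
    have hp := hall _ hm
    have e2 : ((i : Int) + 2) = ((i + 2 : Nat) : Int) := by push_cast; ring
    have e1 : ((i : Int) + 1) = ((i + 1 : Nat) : Int) := by push_cast; ring
    rw [e2, e1] at hp
    simp only [PySem.List.pyGetD_natCast, beq_iff_eq, pow_two] at hp
    exact hp
  · intro hw x hx
    rw [PySem.List.mem_pyRange_one] at hx
    lift x to Nat using hx.1 with i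
    have e2 : ((i : Int) + 2) = ((i + 2 : Nat) : Int) := by push_cast; ring
    have e1 : ((i : Int) + 1) = ((i + 1 : Nat) : Int) := by push_cast; ring
    rw [e2, e1]
    simp only [PySem.List.pyGetD_natCast, beq_iff_eq, pow_two]
    exact hw i (by omega)

-- ===== VERDICT (by name: the statement is the Claim_ definition above) =====
theorem czy_geometryczny_spec : Claim_equal_czy_geometryczny := by
  intro n _
  unfold Spec_czy_geometryczny
  by_cases h : n < 100
  · simp [czy_geometryczny, czy_geometryczny_alt, h]
  · have hA := a_iff n h
    have hB := (alt_iff n h).trans (win_reverse _)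
    cases hA' : czy_geometryczny n <;> cases hB' : czy_geometryczny_alt n <;> simp_all
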